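-- pv_equiv track=rewrite | github.com/o-aguirre/Code-Signal-Exercises | 03.Smooth_Sailing/common_character_count.py | solution
-- ===== SOURCE A (Python) =====
-- def solution(s1, s2):
--     s2 = list(s2)
--     cont = 0
--
--     for i in s1:
--         if i in s2:
--             cont += 1
--             s2.remove(i)
--     return cont
-- ===== SOURCE B (Python) =====
-- def solution(s1, s2):
--     l1 = list(s1)
--     l2 = list(s2)
--     return sum(min(l1.count(c), l2.count(c)) for c in set(l1))
-- ===== Notes on version B (the rewrite author's own statement) =====
-- stated objective: faster
-- what changed: Replaces the per-character membership-test-and-remove loop over a mutable copy of s2 with a sum of min(count in s1, count in s2) over the distinct characters of s1 (multiset-intersection cardinality per character).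
import Mathlib
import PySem

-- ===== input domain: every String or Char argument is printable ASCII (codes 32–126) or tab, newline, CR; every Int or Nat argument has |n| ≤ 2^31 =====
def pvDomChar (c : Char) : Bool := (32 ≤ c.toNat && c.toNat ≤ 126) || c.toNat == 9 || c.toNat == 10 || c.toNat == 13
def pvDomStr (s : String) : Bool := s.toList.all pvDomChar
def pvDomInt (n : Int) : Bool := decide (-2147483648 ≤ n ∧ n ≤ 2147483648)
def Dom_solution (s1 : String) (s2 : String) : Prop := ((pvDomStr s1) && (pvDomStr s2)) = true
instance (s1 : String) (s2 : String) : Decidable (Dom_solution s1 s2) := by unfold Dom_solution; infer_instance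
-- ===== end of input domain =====

-- B replaces A's membership-test-and-remove loop over a mutable copy of s2 by a
-- sum of min(count in s1, count in s2) over the distinct characters of s1 (objective: simpler).


-- ===== PORT A =====
-- loop body: 'if i in s2: cont += 1; s2.remove(i)' over the state (s2, cont)
def solutionStep (st : List Char × Int) (i : Char) : List Char × Int :=
  if i ∈ st.1 then ((PySem.List.remove? st.1 i).getD st.1, st.2 + 1) else st

def solution (s1 : String) (s2 : String) : Int :=
  (s1.toList.foldl solutionStep (s2.toList, 0)).2

-- ===== PORT B =====
-- sum(min(l1.count(c), l2.count(c)) for c in set(l1))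
def solution_alt (s1 : String) (s2 : String) : Int :=
  (PySem.Set.ofList s1.toList).foldl
    (fun acc c => acc + min ((s1.toList.count c : Nat) : Int) ((s2.toList.count c : Nat) : Int)) 0

-- ===== PRECONDITION & SPEC =====
def Spec_solution (s1 : String) (s2 : String) (out : Int) : Prop := out = solution_alt s1 s2
instance (s1 : String) (s2 : String) (out : Int) : Decidable (Spec_solution s1 s2 out) := by unfold Spec_solution; infer_instance

-- ===== CLAIM (what is proved, stated in full; the proofs are below) =====
def Claim_equal_solution : Prop := ∀ (s1 : String) (s2 : String), Dom_solution s1 s2 → Spec_solution s1 s2 (solution s1 s2)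

-- ===== LEMMAS AND PROOFS =====

-- A's loop adds the cardinality of the multiset intersection to the running count.
lemma foldl_A (l1 : List Char) : ∀ (l2 : List Char) (k : Int),
    (l1.foldl solutionStep (l2, k)).2 = k + (((l1 : Multiset Char) ∩ (l2 : Multiset Char)).card : Int) := by
  induction l1 with
  | nil => intro l2 k; simp
  | cons a t ih =>
    intro l2 k
    by_cases h : a ∈ l2
    · have hrem : PySem.List.remove? l2 a = some (l2.erase a) :=
        PySem.List.remove?_eq_some_erase l2 a h
      simp only [List.foldl_cons, solutionStep, h, if_pos, hrem, Option.getD_some]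
      rw [ih (l2.erase a) (k + 1)]
      have hco : ((a :: t : List Char) : Multiset Char) ∩ (l2 : Multiset Char)
          = a ::ₘ ((t : Multiset Char) ∩ ((l2 : Multiset Char).erase a)) := by
        rw [show ((a :: t : List Char) : Multiset Char) = a ::ₘ (t : Multiset Char) from rfl,
          Multiset.cons_inter_of_pos _ (by exact_mod_cast h)]
      rw [hco, ← Multiset.coe_erase, Multiset.card_cons]
      push_cast
      ring
    · simp only [List.foldl_cons, solutionStep, h, if_neg, not_false_iff]
      rw [ih l2 k]
      have hco : ((a :: t : List Char) : Multiset Char) ∩ (l2 : Multiset Char)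
          = (t : Multiset Char) ∩ (l2 : Multiset Char) := by
        rw [show ((a :: t : List Char) : Multiset Char) = a ::ₘ (t : Multiset Char) from rfl,
          Multiset.cons_inter_of_neg _ (by exact_mod_cast h)]
      rw [hco]

-- The per-distinct-character min-count sum is the same cardinality.
lemma sum_min_counts (l1 l2 : List Char) :
    (∑ c ∈ l1.toFinset, min (l1.count c) (l2.count c))
      = ((l1 : Multiset Char) ∩ (l2 : Multiset Char)).card := by
  rw [← Multiset.toFinset_sum_count_eq ((l1 : Multiset Char) ∩ (l2 : Multiset Char))]
  have hsub : ((l1 : Multiset Char) ∩ (l2 : Multiset Char)).toFinset ⊆ l1.toFinset := by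
    intro x hx
    simp only [Multiset.mem_toFinset, Multiset.mem_inter, Multiset.mem_coe] at hx
    exact List.mem_toFinset.mpr hx.1
  rw [Finset.sum_subset hsub (fun x _ hnx =>
    Multiset.count_eq_zero.mpr (fun hm => hnx (Multiset.mem_toFinset.mpr hm)))]
  apply Finset.sum_congr rfl
  intro x _
  rw [Multiset.count_inter, Multiset.coe_count, Multiset.coe_count]

-- B's fold over set(l1) computes that sum (cast to Int).
lemma foldl_B (l1 l2 : List Char) :
    (PySem.Set.ofList l1).foldl
      (fun acc c => acc + min ((l1.count c : Nat) : Int) ((l2.count c : Nat) : Int)) 0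
      = (((l1 : Multiset Char) ∩ (l2 : Multiset Char)).card : Int) := by
  rw [PySem.List.foldl_add, ← PySem.List.dedup_eq_ofList]
  have hn : (PySem.List.dedup l1).Nodup := PySem.List.nodup_dedup l1
  have hcast : ((PySem.List.dedup l1).map
        (fun c => min ((l1.count c : Nat) : Int) ((l2.count c : Nat) : Int))).sum
      = ((((PySem.List.dedup l1).map (fun c => min (l1.count c) (l2.count c))).sum : Nat) : Int) := by
    induction PySem.List.dedup l1 with
    | nil => simp
    | cons a t ih => simp only [List.map_cons, List.sum_cons, ih]; push_cast; ring
  rw [hcast, Finset.sum_list_map_count]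
  have hfin : (PySem.List.dedup l1).toFinset = l1.toFinset := by
    ext x; simp
  have hone : ∀ x ∈ (PySem.List.dedup l1).toFinset,
      (PySem.List.dedup l1).count x • min (l1.count x) (l2.count x)
        = min (l1.count x) (l2.count x) := by
    intro x hx
    rw [List.count_eq_one_of_mem hn (List.mem_toFinset.mp hx), one_smul]
  rw [Finset.sum_congr rfl hone, hfin, sum_min_counts]
  simp

-- ===== VERDICT (by name: the statement is the Claim_ definition above) =====
theorem solution_spec : Claim_equal_solution := by
  intro s1 s2 _
  unfold Spec_solution solution solution_alt
  rw [foldl_A, foldl_B]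
  simp
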